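-- pv_equiv track=rewrite | github.com/yoandresaav/reto-tecnico-md | backend/backend/utils.py | get_answers_olds_and_news
-- ===== SOURCE A (Python) =====
-- def get_answers_olds_and_news(data):
--     """Get the answers most olds and news."""
--     if not data:
--         return {}, {}
--
--     old_answers_date = data[0]['creation_date']
--     old_answer = data[0]
--
--     new_answers_date = data[0]['creation_date']
--     new_answer = data[0]
--
--     data.pop(0)
--
--     for item in data:
--         if item['creation_date'] > old_answers_date:
--             old_answers_date = item['creation_date']
--             old_answer = item
--
--         elif item['creation_date'] < new_answers_date:
--             new_answers_date = item['creation_date']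
--             new_answer = item
--
--     return old_answer, new_answer
-- ===== SOURCE B (Python) =====
-- def get_answers_olds_and_news(data):
--     """Get the answers most olds and news."""
--     if not data:
--         return {}, {}
--     old_answer = max(data, key=lambda x: x['creation_date'])
--     new_answer = min(data, key=lambda x: x['creation_date'])
--     data.pop(0)
--     return old_answer, new_answer
-- ===== Notes on version B (the rewrite author's own statement) =====
-- stated objective: simpler
-- what changed: Replaces A's single hand-rolled combined extrema loop (four state variables, if/elif) with two separate builtin reductions max(data, key=...) and min(data, key=...), which share A's first-extremal tie-breaking; the data.pop(0) side-effect is kept.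
import Mathlib
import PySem

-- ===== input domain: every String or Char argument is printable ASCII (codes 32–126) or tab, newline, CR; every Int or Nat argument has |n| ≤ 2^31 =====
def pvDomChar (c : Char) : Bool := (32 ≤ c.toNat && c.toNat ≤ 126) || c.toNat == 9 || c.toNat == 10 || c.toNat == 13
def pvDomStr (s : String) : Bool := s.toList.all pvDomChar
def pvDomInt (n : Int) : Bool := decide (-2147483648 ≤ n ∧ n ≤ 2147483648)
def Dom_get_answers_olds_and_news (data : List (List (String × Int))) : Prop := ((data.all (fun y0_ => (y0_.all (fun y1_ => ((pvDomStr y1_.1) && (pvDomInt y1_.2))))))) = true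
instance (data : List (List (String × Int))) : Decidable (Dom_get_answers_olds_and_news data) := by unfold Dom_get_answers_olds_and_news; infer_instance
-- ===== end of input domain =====

-- B replaces A's single combined extrema loop with two separate builtin-style reductions
-- (max-by then min-by over the full list); objective: simpler. Both A and B pop the first
-- element of `data` in Python (caller-visible mutation); the equivalence proved here is
-- about the RETURN value only.


-- dict access item['creation_date']: first match in the association list (exact for a Python dict);
-- `cdate` defaults to 0, which is never reached inside Pre_ (the key is present).
def cdate? (d : List (String × Int)) : Option Int :=
  (List.find? (fun p => p.1 == "creation_date") d).map Prod.snd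

def cdate (d : List (String × Int)) : Int := (cdate? d).getD 0

-- ===== PORT A =====
-- A's loop body: if item's date > running old-date update old, elif < running new-date update new.
def aStep (st : Int × List (String × Int) × Int × List (String × Int))
    (item : List (String × Int)) : Int × List (String × Int) × Int × List (String × Int) :=
  if st.1 < cdate item then (cdate item, item, st.2.2.1, st.2.2.2)
  else if cdate item < st.2.2.1 then (st.1, st.2.1, cdate item, item)
  else st

def get_answers_olds_and_news (data : List (List (String × Int))) : (List (String × Int)) × (List (String × Int)) :=
  match data with
  | [] => ([], [])
  | first :: rest =>
    -- data.pop(0): the loop runs over the tail, starting from data[0] as both extrema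
    let st := rest.foldl aStep (cdate first, first, cdate first, first)
    (st.2.1, st.2.2.2)

-- ===== PORT B =====
def get_answers_olds_and_news_alt (data : List (List (String × Int))) : (List (String × Int)) × (List (String × Int)) :=
  match data with
  | [] => ([], [])
  | _ :: _ =>
    ((PySem.List.max? data cdate).getD [], (PySem.List.min? data cdate).getD [])

-- ===== PRECONDITION & SPEC =====
-- Pre_ excludes inputs where some dict lacks the 'creation_date' key: A raises KeyError there (and so does B).
def Pre_get_answers_olds_and_news (data : List (List (String × Int))) : Prop :=
  ∀ d ∈ data, (cdate? d).isSome = true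
instance (data : List (List (String × Int))) : Decidable (Pre_get_answers_olds_and_news data) := by
  unfold Pre_get_answers_olds_and_news; infer_instance

def pvWitness_get_answers_olds_and_news : (List (List (String × Int))) :=
  [[("creation_date", 3)], [("creation_date", 1), ("id", 7)], [("creation_date", 5)]]

def Spec_get_answers_olds_and_news (data : List (List (String × Int))) (out : (List (String × Int)) × (List (String × Int))) : Prop := out = get_answers_olds_and_news_alt data
instance (data : List (List (String × Int))) (out : (List (String × Int)) × (List (String × Int))) : Decidable (Spec_get_answers_olds_and_news data out) := by unfold Spec_get_answers_olds_and_news; infer_instance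

-- ===== CLAIM (what is proved, stated in full; the proofs are below) =====
def Claim_equal_get_answers_olds_and_news : Prop := ∀ (data : List (List (String × Int))), Dom_get_answers_olds_and_news data → Pre_get_answers_olds_and_news data → Spec_get_answers_olds_and_news data (get_answers_olds_and_news data)

-- ===== LEMMAS AND PROOFS =====

def maxStep (m x : List (String × Int)) : List (String × Int) :=
  if cdate m < cdate x then x else m

def minStep (m x : List (String × Int)) : List (String × Int) :=
  if cdate x < cdate m then x else m

-- PySem.List.max? over a nonempty list is the plain running-max fold
theorem max?_fold (rest : List (List (String × Int))) :
    ∀ m, PySem.List.max? (m :: rest) cdate = some (rest.foldl maxStep m) := by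
  induction rest with
  | nil => intro m; rfl
  | cons x t ih =>
    intro m
    show List.foldl _ (if cdate m < cdate x then some x else some m) t = _
    rw [List.foldl_cons]
    by_cases h : cdate m < cdate x
    · rw [if_pos h, show maxStep m x = x from if_pos h]
      exact ih x
    · rw [if_neg h, show maxStep m x = m from if_neg h]
      exact ih m

theorem min?_fold (rest : List (List (String × Int))) :
    ∀ m, PySem.List.min? (m :: rest) cdate = some (rest.foldl minStep m) := by
  induction rest with
  | nil => intro m; rfl
  | cons x t ih =>
    intro m
    show List.foldl _ (if cdate x < cdate m then some x else some m) t = _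
    rw [List.foldl_cons]
    by_cases h : cdate x < cdate m
    · rw [if_pos h, show minStep m x = x from if_pos h]
      exact ih x
    · rw [if_neg h, show minStep m x = m from if_neg h]
      exact ih m

-- A's combined loop computes exactly the two separate folds, under the invariant
-- "running min-date ≤ running max-date"
theorem loop_eq (rest : List (List (String × Int))) :
    ∀ (oa na : List (String × Int)), cdate na ≤ cdate oa →
    rest.foldl aStep (cdate oa, oa, cdate na, na) =
      (cdate (rest.foldl maxStep oa), rest.foldl maxStep oa,
       cdate (rest.foldl minStep na), rest.foldl minStep na) := by
  induction rest with
  | nil => intro oa na _; rfl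
  | cons x t ih =>
    intro oa na h
    simp only [List.foldl_cons, aStep, maxStep, minStep]
    by_cases h1 : cdate oa < cdate x
    · have hx : ¬ cdate x < cdate na := by omega
      simp only [if_pos h1, if_neg hx]
      exact ih x na (by omega)
    · by_cases h2 : cdate x < cdate na
      · have hx : ¬ cdate na < cdate x := by omega
        simp only [if_neg h1, if_pos h2, if_neg hx]
        exact ih oa x (by omega)
      · simp only [if_neg h1, if_neg h2]
        exact ih oa na h

-- ===== VERDICT (by name: the statement is the Claim_ definition above) =====
theorem get_answers_olds_and_news_spec : Claim_equal_get_answers_olds_and_news := by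
  intro data _ _
  unfold Spec_get_answers_olds_and_news
  match data with
  | [] => rfl
  | first :: rest =>
    show (_, _) = _
    rw [loop_eq rest first first le_rfl]
    simp [get_answers_olds_and_news_alt, max?_fold, min?_fold]
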